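-- pv_equiv track=rewrite | github.com/HumbertoBPF/LeetCodePython | SolutionLeetCode91.py | get_decodable_str
-- ===== SOURCE A (Python) =====
-- def get_decodable_str(s):
--     decodable_str = []
--
--     n = len(s)
--     # A zero has to combine with "1" and "2" to form "10" and "20" respectively in order to be decoded
--     for i in range(n):
--         char = s[i]
--         if char == "0":
--             # Since the first digit doesn't have a left neighbor, if it is 0, the string is not decodable
--             # For other positions, if the digit is 0, we need 1 or 2 on the left to assure that the string is decodable
--             if (i == 0) or (s[i - 1] != "1" and s[i - 1] != "2"):
--                 return None
--             continue
--
--         if i < n - 1: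
--             next_char = s[i + 1]
--             if next_char == "0":
--                 decodable_str.append(char + next_char)
--                 continue
--
--         decodable_str.append(char)
--
--     return decodable_str
-- ===== SOURCE B (Python) =====
-- def get_decodable_str(s):
--     # B: backward scan; each zero must pair with the decodable digit to its left, which is
--     # consumed together with it; tokens are collected right-to-left and reversed.
--     rev = []
--     i = len(s) - 1
--     while i >= 0:
--         c = s[i]
--         if c == "0":
--             if i > 0 and (s[i - 1] == "1" or s[i - 1] == "2"):
--                 rev.append(s[i - 1] + "0")
--                 i -= 2
--             else:
--                 return None
--         else:
--             rev.append(c)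
--             i -= 1
--     rev.reverse()
--     return rev
-- ===== Notes on version B (the rewrite author's own statement) =====
-- stated objective: alternative
-- what changed: A scans left-to-right over every index, pairing a char with a following zero and then revisiting that zero to validate its left neighbour; B scans right-to-left, consuming each zero together with its mandatory one-or-two left neighbour in a single step (the index jumps by two), collecting tokens in reverse and reversing once at the end.
import Mathlib
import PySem

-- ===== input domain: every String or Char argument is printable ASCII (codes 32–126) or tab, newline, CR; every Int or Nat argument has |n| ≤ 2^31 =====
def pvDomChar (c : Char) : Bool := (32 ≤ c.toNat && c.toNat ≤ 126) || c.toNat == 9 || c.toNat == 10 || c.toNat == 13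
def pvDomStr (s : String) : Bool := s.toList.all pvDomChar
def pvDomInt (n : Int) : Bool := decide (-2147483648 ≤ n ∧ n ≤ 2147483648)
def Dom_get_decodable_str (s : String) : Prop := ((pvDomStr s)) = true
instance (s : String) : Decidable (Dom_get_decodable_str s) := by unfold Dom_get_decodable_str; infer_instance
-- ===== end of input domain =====

-- B replaces A's left-to-right index scan (which revisits each zero to validate it)
-- with a right-to-left scan that consumes a zero together with its mandatory left
-- neighbour in one step, collecting tokens in reverse; objective: alternative decomposition.


-- ===== PORT A =====
-- for-loop over range(n) with early return; a zero needs a decodable left neighbour,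
-- a char followed by a zero is appended as a pair (the zero is revisited next step).
def pvALoop (l : List Char) (i : Nat) (acc : List String) : Option (List String) :=
  if i < l.length then
    if l.getD i ' ' = '0' then
      if i = 0 ∨ (l.getD (i - 1) ' ' ≠ '1' ∧ l.getD (i - 1) ' ' ≠ '2') then none
      else pvALoop l (i + 1) acc
    else
      if i < l.length - 1 ∧ l.getD (i + 1) ' ' = '0' then
        pvALoop l (i + 1) (acc ++ [String.ofList [l.getD i ' ', '0']])
      else
        pvALoop l (i + 1) (acc ++ [String.ofList [l.getD i ' ']])
  else some acc
termination_by l.length - i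

def get_decodable_str (s : String) : Option (List String) :=
  pvALoop s.toList 0 []

-- ===== PORT B =====
-- Python's index i (which may step to -1) is encoded as j = i + 1 : Nat; the loop
-- runs while i >= 0, i.e. 0 < j, and i -= 2 / i -= 1 become j - 2 / j - 1.
def pvBack (l : List Char) (j : Nat) (rev : List String) : Option (List String) :=
  if 0 < j then
    if l.getD (j - 1) ' ' = '0' then
      if 1 < j ∧ (l.getD (j - 2) ' ' = '1' ∨ l.getD (j - 2) ' ' = '2') then
        pvBack l (j - 2) (rev ++ [String.ofList [l.getD (j - 2) ' ', '0']])
      else none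
    else pvBack l (j - 1) (rev ++ [String.ofList [l.getD (j - 1) ' ']])
  else some rev.reverse
termination_by j

def get_decodable_str_alt (s : String) : Option (List String) :=
  pvBack s.toList s.toList.length []

-- ===== PRECONDITION & SPEC =====
def Spec_get_decodable_str (s : String) (out : Option (List String)) : Prop := out = get_decodable_str_alt s
instance (s : String) (out : Option (List String)) : Decidable (Spec_get_decodable_str s out) := by unfold Spec_get_decodable_str; infer_instance

-- ===== CLAIM (what is proved, stated in full; the proofs are below) =====
def Claim_equal_get_decodable_str : Prop := ∀ (s : String), Dom_get_decodable_str s → Spec_get_decodable_str s (get_decodable_str s)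

-- ===== LEMMAS AND PROOFS =====

-- Midpoint specification: recursive tokenizer (used only in the proofs).
def tok : List Char → Option (List String)
  | [] => some []
  | c :: cs =>
    if c = '0' then none
    else if cs.head? = some '0' then
      if c = '1' ∨ c = '2' then (tok cs.tail).map (String.ofList [c, '0'] :: ·)
      else none
    else (tok cs).map (String.ofList [c] :: ·)
termination_by l => l.length
decreasing_by
  all_goals simp only [List.length_tail, List.length_cons]
  all_goals omega

-- Invariant at A's index i: i is not a '0' whose left neighbour is '1'/'2'.
def pvInv (l : List Char) (i : Nat) : Prop :=
  i = 0 ∨ ¬ (l.getD i ' ' = '0' ∧ (l.getD (i - 1) ' ' = '1' ∨ l.getD (i - 1) ' ' = '2'))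


theorem tok_zero (cs : List Char) : tok ('0' :: cs) = none := by
  simp [tok]

theorem tok_cons_zero (a : Char) (cs : List Char) (ha : a ≠ '0') :
    tok (a :: '0' :: cs)
      = if a = '1' ∨ a = '2' then (tok cs).map (String.ofList [a, '0'] :: ·) else none := by
  simp [tok, ha]

theorem tok_cons (a : Char) (cs : List Char) (ha : a ≠ '0') (hhd : cs.head? ≠ some '0') :
    tok (a :: cs) = (tok cs).map (String.ofList [a] :: ·) := by
  simp [tok, ha, hhd]

theorem pvA_tok (l : List Char) :
    ∀ (k i : Nat) (acc : List String), l.length - i ≤ k → pvInv l i →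
      pvALoop l i acc = (tok (l.drop i)).map (acc ++ ·) := by
  intro k
  induction k with
  | zero =>
    intro i acc hk _
    have hi : ¬ i < l.length := by omega
    rw [pvALoop, if_neg hi, List.drop_eq_nil_of_le (by omega)]
    simp [tok]
  | succ k ih =>
    intro i acc hk hinv
    by_cases hi : i < l.length
    · have hget : l.getD i ' ' = l[i] := List.getD_eq_getElem l ' ' hi
      have hdrop : l.drop i = l[i] :: l.drop (i + 1) := List.drop_eq_getElem_cons hi
      rw [pvALoop, if_pos hi, hdrop]
      by_cases hc : l.getD i ' ' = '0'
      · rw [if_pos hc]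
        have hcond : i = 0 ∨ (l.getD (i - 1) ' ' ≠ '1' ∧ l.getD (i - 1) ' ' ≠ '2') := by
          rcases hinv with h0 | hn
          · exact Or.inl h0
          · by_cases h0 : i = 0
            · exact Or.inl h0
            · exact Or.inr ⟨fun hp => hn ⟨hc, Or.inl hp⟩, fun hp => hn ⟨hc, Or.inr hp⟩⟩
        rw [if_pos hcond]
        rw [hget] at hc
        simp [tok, hc]
      · rw [if_neg hc]
        by_cases hpair : i < l.length - 1 ∧ l.getD (i + 1) ' ' = '0'
        · have hi1 : i + 1 < l.length := by omega
          have hdrop1 : l.drop (i + 1) = l[i + 1] :: l.drop (i + 2) := List.drop_eq_getElem_cons hi1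
          have hget1 : l.getD (i + 1) ' ' = l[i + 1] := List.getD_eq_getElem l ' ' hi1
          have hz : l[i + 1] = '0' := by rw [← hget1]; exact hpair.2
          rw [if_pos hpair, pvALoop, if_pos hi1, if_pos hpair.2]
          have hsub : i + 1 - 1 = i := rfl
          by_cases h12 : l.getD i ' ' ≠ '1' ∧ l.getD i ' ' ≠ '2'
          · rw [if_pos (Or.inr (hsub ▸ h12))]
            rw [hget] at hc h12
            simp [tok, hdrop1, hz, hc, h12.1, h12.2]
          · have hAcond : ¬ (i + 1 = 0 ∨ (l.getD (i + 1 - 1) ' ' ≠ '1' ∧ l.getD (i + 1 - 1) ' ' ≠ '2')) := by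
              rw [hsub]
              rintro (h0 | h)
              · omega
              · exact h12 h
            rw [if_neg hAcond]
            have h12' : l[i] = '1' ∨ l[i] = '2' := by
              rw [← hget]; by_cases h1 : l.getD i ' ' = '1'
              · exact Or.inl h1
              · exact Or.inr (by by_contra h2; exact h12 ⟨h1, h2⟩)
            have hinv2 : pvInv l (i + 2) := by
              refine Or.inr ?_
              rintro ⟨_, hprev⟩
              have h21 : i + 2 - 1 = i + 1 := rfl
              rw [h21, hget1, hz] at hprev
              rcases hprev with h | h <;> exact absurd h (by decide)
            have : i + 1 + 1 = i + 2 := rfl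
            rw [this, ih (i + 2) _ (by omega) hinv2]
            rw [hget] at hc ⊢
            rcases htk : tok (l.drop (i + 2)) with _ | t <;>
              simp [tok, hdrop1, hz, hc, h12', htk]
        · have hA : ¬ (i < l.length - 1 ∧ l.getD (i + 1) ' ' = '0') := hpair
          rw [if_neg hA]
          have hinv1 : pvInv l (i + 1) := by
            refine Or.inr ?_
            rintro ⟨h0, _⟩
            by_cases hi1 : i + 1 < l.length
            · exact hpair ⟨by omega, h0⟩
            · rw [List.getD_eq_default _ _ (by omega)] at h0
              exact absurd h0 (by decide)
          have hhd : (l.drop (i + 1)).head? ≠ some '0' := by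
            by_cases hi1 : i + 1 < l.length
            · rw [List.drop_eq_getElem_cons hi1]
              have : l.getD (i + 1) ' ' = l[i + 1] := List.getD_eq_getElem l ' ' hi1
              simp only [List.head?_cons, ← this]
              intro h; exact hpair ⟨by omega, by injection h⟩
            · rw [List.drop_eq_nil_of_le (by omega)]; simp
          rw [hget] at hc
          have hTok : tok (l[i] :: l.drop (i + 1))
              = (tok (l.drop (i + 1))).map (String.ofList [l[i]] :: ·) := by
            simp only [tok]
            rw [if_neg hc, if_neg hhd]
          rw [ih (i + 1) _ (by omega) hinv1, hTok, hget]
          rcases tok (l.drop (i + 1)) with _ | t <;> simp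
    · rw [pvALoop, if_neg hi, List.drop_eq_nil_of_le (by omega)]
      simp [tok]

theorem tok_append :
    ∀ (k : Nat) (xs ys : List Char), xs.length ≤ k → ys.head? ≠ some '0' →
      tok (xs ++ ys) = (tok xs).bind (fun t => (tok ys).map (t ++ ·)) := by
  intro k
  induction k with
  | zero =>
    intro xs ys hk hhd
    have hx : xs = [] := by cases xs with
      | nil => rfl
      | cons a zs => simp at hk
    subst hx
    rw [List.nil_append]
    rcases htk : tok ys with _ | t <;> simp [tok]
  | succ k ih =>
    intro xs ys hk hhd
    match xs with
    | [] =>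
      rw [List.nil_append]
      rcases htk : tok ys with _ | t <;> simp [tok]
    | a :: zs =>
      by_cases ha : a = '0'
      · subst ha
        rw [List.cons_append, tok_zero, tok_zero]
        rfl
      · cases hz : zs with
        | nil =>
          subst hz
          rw [List.cons_append, List.nil_append,
              tok_cons a ys ha hhd,
              tok_cons a [] ha (by simp)]
          rcases tok ys with _ | t <;> simp [tok]
        | cons b zs' =>
          subst hz
          by_cases hb : b = '0'
          · subst hb
            rw [List.cons_append, List.cons_append,
                tok_cons_zero a (zs' ++ ys) ha, tok_cons_zero a zs' ha]
            by_cases h12 : a = '1' ∨ a = '2'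
            · rw [if_pos h12, if_pos h12,
                  ih zs' ys (by simp at hk; omega) hhd]
              rcases tok zs' with _ | t <;> rcases tok ys with _ | u <;> simp
            · rw [if_neg h12, if_neg h12]; rfl
          · have hb' : (b :: zs').head? ≠ some '0' := by simp [hb]
            have hb'' : (b :: (zs' ++ ys)).head? ≠ some '0' := by simp [hb]
            rw [List.cons_append, List.cons_append,
                tok_cons a (b :: (zs' ++ ys)) ha hb'',
                tok_cons a (b :: zs') ha hb',
                ← List.cons_append,
                ih (b :: zs') ys (by simp at hk ⊢; omega) hhd]
            rcases tok (b :: zs') with _ | t <;> rcases tok ys with _ | u <;> simp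

theorem tok_snoc_zero :
    ∀ (k : Nat) (xs : List Char), xs.length ≤ k →
      xs.getLast? ≠ some '1' → xs.getLast? ≠ some '2' →
      tok (xs ++ ['0']) = none := by
  intro k
  induction k with
  | zero =>
    intro xs hk _ _
    have hx : xs = [] := by cases xs with
      | nil => rfl
      | cons a zs => simp at hk
    subst hx; exact tok_zero []
  | succ k ih =>
    intro xs hk h1 h2
    match xs with
    | [] => exact tok_zero []
    | a :: ys =>
      by_cases ha : a = '0'
      · subst ha; rw [List.cons_append]; exact tok_zero _
      · cases hy : ys with
        | nil =>
          subst hy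
          simp only [List.getLast?_singleton] at h1 h2
          have h12 : ¬ (a = '1' ∨ a = '2') := by
            rintro (h | h)
            · exact h1 (by rw [h])
            · exact h2 (by rw [h])
          rw [List.cons_append, List.nil_append, tok_cons_zero a [] ha, if_neg h12]
        | cons b ys' =>
          subst hy
          rw [List.getLast?_cons_cons] at h1 h2
          by_cases hb : b = '0'
          · subst hb
            have htail : tok (ys' ++ ['0']) = none := by
              cases hy' : ys' with
              | nil => exact tok_zero []
              | cons c t =>
                subst hy'
                rw [List.getLast?_cons_cons] at h1 h2
                exact ih (c :: t) (by simp at hk ⊢; omega) h1 h2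
            rw [List.cons_append, List.cons_append, tok_cons_zero a (ys' ++ ['0']) ha]
            by_cases h12 : a = '1' ∨ a = '2'
            · rw [if_pos h12, htail]; rfl
            · rw [if_neg h12]
          · have hrest : tok ((b :: ys') ++ ['0']) = none :=
              ih (b :: ys') (by simp at hk ⊢; omega) h1 h2
            have hb' : (b :: (ys' ++ ['0'])).head? ≠ some '0' := by simp [hb]
            rw [List.cons_append, List.cons_append,
                tok_cons a (b :: (ys' ++ ['0'])) ha hb', ← List.cons_append, hrest]
            rfl

theorem pvB_tok (l : List Char) :
    ∀ (k j : Nat) (rev : List String), j ≤ k → j ≤ l.length →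
      pvBack l j rev = (tok (l.take j)).map (· ++ rev.reverse) := by
  intro k
  induction k with
  | zero =>
    intro j rev hk _
    have hj : j = 0 := by omega
    subst hj
    rw [pvBack]
    simp [tok]
  | succ k ih =>
    intro j rev hk hlen
    by_cases hj : 0 < j
    · have hj1 : j - 1 < l.length := by omega
      have hget : l.getD (j - 1) ' ' = l[j - 1] := List.getD_eq_getElem l ' ' hj1
      have htake : l.take j = l.take (j - 1) ++ [l[j - 1]] := by
        have hjj : j = (j - 1) + 1 := by omega
        conv_lhs => rw [hjj]
        rw [List.take_add_one, List.getElem?_eq_getElem hj1]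
        rfl
      rw [pvBack, if_pos hj]
      by_cases hc : l.getD (j - 1) ' ' = '0'
      · rw [if_pos hc]
        have hz : l[j - 1] = '0' := by rw [← hget]; exact hc
        by_cases hp : 1 < j ∧ (l.getD (j - 2) ' ' = '1' ∨ l.getD (j - 2) ' ' = '2')
        · rw [if_pos hp]
          have hj2 : j - 2 < l.length := by omega
          have hget2 : l.getD (j - 2) ' ' = l[j - 2] := List.getD_eq_getElem l ' ' hj2
          have h12 : l[j - 2] = '1' ∨ l[j - 2] = '2' := by rw [← hget2]; exact hp.2
          have hc0 : l[j - 2] ≠ '0' := by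
            rcases h12 with h | h <;> rw [h] <;> decide
          have htake2 : l.take (j - 1) = l.take (j - 2) ++ [l[j - 2]] := by
            have hjj : j - 1 = (j - 2) + 1 := by omega
            conv_lhs => rw [hjj]
            rw [List.take_add_one, List.getElem?_eq_getElem hj2]
            rfl
          have htt : l.take j = l.take (j - 2) ++ [l[j - 2], '0'] := by
            rw [htake, htake2, hz, List.append_assoc]
            rfl
          have hpairtok : tok [l[j - 2], '0'] = some [String.ofList [l[j - 2], '0']] := by
            rw [tok_cons_zero _ _ hc0, if_pos h12]
            simp [tok]
          rw [ih (j - 2) _ (by omega) (by omega), htt,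
              tok_append (l.take (j - 2)).length (l.take (j - 2)) [l[j - 2], '0']
                le_rfl (by simp [hc0]),
              hpairtok, hget2]
          rcases tok (l.take (j - 2)) with _ | t <;> simp
        · rw [if_neg hp]
          have hnone : tok (l.take j) = none := by
            rw [htake, hz]
            by_cases hj1' : 1 < j
            · have hj2 : j - 2 < l.length := by omega
              have hget2 : l.getD (j - 2) ' ' = l[j - 2] := List.getD_eq_getElem l ' ' hj2
              have h12 : l.getD (j - 2) ' ' ≠ '1' ∧ l.getD (j - 2) ' ' ≠ '2' :=
                ⟨fun h => hp ⟨hj1', Or.inl h⟩, fun h => hp ⟨hj1', Or.inr h⟩⟩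
              have htake2 : l.take (j - 1) = l.take (j - 2) ++ [l[j - 2]] := by
                have hjj : j - 1 = (j - 2) + 1 := by omega
                conv_lhs => rw [hjj]
                rw [List.take_add_one, List.getElem?_eq_getElem hj2]
                rfl
              have hlast : (l.take (j - 1)).getLast? = some l[j - 2] := by
                rw [htake2, List.getLast?_concat]
              refine tok_snoc_zero (l.take (j - 1)).length _ le_rfl ?_ ?_
              · rw [hlast]
                intro h
                have hv : l[j - 2] = '1' := by injection h
                exact h12.1 (by rw [hget2, hv])
              · rw [hlast]
                intro h
                have hv : l[j - 2] = '2' := by injection h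
                exact h12.2 (by rw [hget2, hv])
            · have hj0 : j = 1 := by omega
              rw [hj0]
              simp [tok]
          rw [hnone]
          rfl
      · rw [if_neg hc]
        have hc' : l[j - 1] ≠ '0' := by rw [← hget]; exact hc
        have hsingle : tok [l[j - 1]] = some [String.ofList [l[j - 1]]] := by
          rw [tok_cons _ _ hc' (by simp)]
          simp [tok]
        rw [ih (j - 1) _ (by omega) (by omega), htake,
            tok_append (l.take (j - 1)).length (l.take (j - 1)) [l[j - 1]]
              le_rfl (by simp [hc']),
            hsingle, hget]
        rcases tok (l.take (j - 1)) with _ | t <;> simp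
    · rw [pvBack, if_neg hj]
      have hj0 : j = 0 := by omega
      subst hj0
      simp [tok]

-- ===== VERDICT (by name: the statement is the Claim_ definition above) =====
theorem get_decodable_str_spec : Claim_equal_get_decodable_str := by
  intro s _
  unfold Spec_get_decodable_str get_decodable_str get_decodable_str_alt
  rw [pvA_tok s.toList s.toList.length 0 [] (by omega) (Or.inl rfl),
      pvB_tok s.toList s.toList.length s.toList.length [] le_rfl le_rfl,
      List.take_length]
  simp
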